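-- pv_equiv track=rewrite | github.com/DmitryChitalov/python_algos_gb | homework_4/task_5.py | simple_2
-- ===== SOURCE A (Python) =====
-- def simple_2(i):
--     if i == 1:
--         return 2
--     elif i == 2:
--         return 3
--     elif i == 3:
--         return 5
--     elif i == 4:
--         return 7
--     num = 8
--     count = 5
--     while True:
--         if num % 2 != 0 and num % 3 != 0 and num % 5 != 0 and num % 7 != 0:
--             simple = num
--             count += 1
--         num += 1
--         if count > i:
--             break
--     return simple
-- ===== SOURCE B (Python) =====
-- # Wheel mod 210: the 48 residues coprime to 2,3,5,7; index directly, O(1).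
-- _WHEEL = [r for r in range(210) if r % 2 and r % 3 and r % 5 and r % 7]
--
-- def simple_2(i):
--     if i < 5:
--         return [2, 3, 5, 7][i - 1]
--     q, r = divmod(i - 4, 48)
--     return 210 * q + _WHEEL[r]
-- ===== Notes on version B (the rewrite author's own statement) =====
-- stated objective: faster
-- what changed: Replaces the linear trial loop counting numbers coprime to 2,3,5,7 with a direct O(1) wheel lookup: precompute the 48 residues mod 210 and index via divmod.
import Mathlib
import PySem

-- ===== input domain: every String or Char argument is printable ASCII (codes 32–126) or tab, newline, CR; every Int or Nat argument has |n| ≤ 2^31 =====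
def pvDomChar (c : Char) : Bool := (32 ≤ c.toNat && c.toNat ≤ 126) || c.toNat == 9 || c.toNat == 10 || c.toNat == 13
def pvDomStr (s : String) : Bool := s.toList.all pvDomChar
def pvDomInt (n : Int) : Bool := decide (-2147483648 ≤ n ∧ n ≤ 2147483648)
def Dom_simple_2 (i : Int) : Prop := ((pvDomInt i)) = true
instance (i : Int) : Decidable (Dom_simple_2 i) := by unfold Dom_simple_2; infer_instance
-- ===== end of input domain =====

-- B replaces A's linear trial loop by an O(1) wheel lookup (48 residues mod 210, indexed via divmod).

-- ===== PORT A =====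
-- A's loop test: num % 2 != 0 and num % 3 != 0 and num % 5 != 0 and num % 7 != 0
def pvC (n : Int) : Bool :=
  PySem.Int.mod n 2 != 0 && PySem.Int.mod n 3 != 0 && PySem.Int.mod n 5 != 0 && PySem.Int.mod n 7 != 0

-- A's `while True` loop, step for step; `fuel` is a totality guard only (proved sufficient below).
def pvLoopA (i : Int) : Nat → Int → Int → Int → Int
  | 0, _, _, simple => simple
  | fuel + 1, num, count, simple =>
    let p := if pvC num then (num, count + 1) else (simple, count)   -- (simple, count) after the if
    if p.2 > i then p.1 else pvLoopA i fuel (num + 1) p.2 p.1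

def simple_2 (i : Int) : Int :=
  if i = 1 then 2
  else if i = 2 then 3
  else if i = 3 then 5
  else if i = 4 then 7
  -- initial simple is Python's unbound variable: it is only returned where Python raises
  -- UnboundLocalError (i ≤ 0, excluded by Pre_); 0 is a placeholder for it.
  else pvLoopA i (6 * i + 210).toNat 8 5 0

-- ===== PORT B =====
-- _WHEEL = [r for r in range(210) if r % 2 and r % 3 and r % 5 and r % 7]
def pvWheel : List Int :=
  (PySem.List.pyRange 0 210 1).filter (fun r =>
    PySem.Int.mod r 2 != 0 && PySem.Int.mod r 3 != 0 && PySem.Int.mod r 5 != 0 && PySem.Int.mod r 7 != 0)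

def simple_2_alt (i : Int) : Int :=
  if i < 5 then (PySem.List.pyGet? ([2, 3, 5, 7] : List Int) (i - 1)).getD 0
  else
    let q := PySem.Int.floordiv (i - 4) 48
    let r := PySem.Int.mod (i - 4) 48
    210 * q + (PySem.List.pyGet? pvWheel r).getD 0   -- 0 ≤ r < 48 always; .getD 0 is unreachable

-- ===== PRECONDITION & SPEC =====
-- A raises UnboundLocalError for i ≤ 0 (the loop breaks before `simple` is ever assigned);
-- Pre_ excludes exactly those inputs.
def Pre_simple_2 (i : Int) : Prop := 1 ≤ i
instance (i : Int) : Decidable (Pre_simple_2 i) := by unfold Pre_simple_2; infer_instance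
def pvWitness_simple_2 : Int := 7

def Spec_simple_2 (i : Int) (out : Int) : Prop := out = simple_2_alt i
instance (i : Int) (out : Int) : Decidable (Spec_simple_2 i out) := by unfold Spec_simple_2; infer_instance

-- ===== CLAIM (what is proved, stated in full; the proofs are below) =====
def Claim_equal_simple_2 : Prop := ∀ (i : Int), Dom_simple_2 i → Pre_simple_2 i → Spec_simple_2 i (simple_2 i)

-- ===== LEMMAS AND PROOFS =====

-- Nat-side mirror of the coprimality test and the wheel.
def cN (n : Nat) : Bool := n % 2 != 0 && n % 3 != 0 && n % 5 != 0 && n % 7 != 0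

def RL : List Nat :=
  [1, 11, 13, 17, 19, 23, 29, 31, 37, 41, 43, 47, 53, 59, 61, 67, 71, 73, 79, 83, 89, 97,
   101, 103, 107, 109, 113, 121, 127, 131, 137, 139, 143, 149, 151, 157, 163, 167, 169, 173,
   179, 181, 187, 191, 193, 197, 199, 209]

-- the n-th (0-based) positive number coprime to 2,3,5,7, counting 1 as the 0th
def gN (n : Nat) : Nat := 210 * (n / 48) + RL.getD (n % 48) 0

theorem pvC_eq (x : Int) (hx : 0 ≤ x) : pvC x = cN x.toNat := by
  lift x to ℕ using hx
  unfold pvC cN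
  rw [PySem.Int.mod_eq_emod_of_pos (by norm_num : (0:Int) < 2),
      PySem.Int.mod_eq_emod_of_pos (by norm_num : (0:Int) < 3),
      PySem.Int.mod_eq_emod_of_pos (by norm_num : (0:Int) < 5),
      PySem.Int.mod_eq_emod_of_pos (by norm_num : (0:Int) < 7)]
  simp only [Int.toNat_natCast]
  have h2 : ((2:Int) ∣ (x:Int)) ↔ (x % 2 = 0) := by omega
  have h3 : ((3:Int) ∣ (x:Int)) ↔ (x % 3 = 0) := by omega
  have h5 : ((5:Int) ∣ (x:Int)) ↔ (x % 5 = 0) := by omega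
  have h7 : ((7:Int) ∣ (x:Int)) ↔ (x % 7 = 0) := by omega
  simp [bne, beq_eq_decide, h2, h3, h5, h7]

theorem cN_add_210 (n : Nat) : cN (n + 210) = cN n := by
  unfold cN
  have h2 : (n + 210) % 2 = n % 2 := by omega
  have h3 : (n + 210) % 3 = n % 3 := by omega
  have h5 : (n + 210) % 5 = n % 5 := by omega
  have h7 : (n + 210) % 7 = n % 7 := by omega
  rw [h2, h3, h5, h7]

theorem cN_period (q d : Nat) : cN (210 * q + d) = cN d := by
  induction q with
  | zero => simp
  | succ q ih =>
    have h : 210 * (q + 1) + d = (210 * q + d) + 210 := by ring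
    rw [h, cN_add_210, ih]

theorem dRL_coprime : ∀ j, j < 48 → cN (RL.getD j 0) = true := by decide
theorem dRL_lt : ∀ j, j < 48 → RL.getD j 0 < 210 := by decide
theorem dRL_mono : ∀ j, j < 47 → RL.getD j 0 < RL.getD (j + 1) 0 := by decide
set_option maxRecDepth 40000 in
theorem dRL_gap : ∀ j, j < 47 → ∀ d, d < 210 →
    RL.getD j 0 < d → d < RL.getD (j + 1) 0 → cN d = false := by decide

theorem gN_coprime (n : Nat) : cN (gN n) = true := by
  unfold gN
  rw [cN_period]
  exact dRL_coprime _ (Nat.mod_lt _ (by norm_num))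

theorem gN_strict (n : Nat) : gN n < gN (n + 1) := by
  unfold gN
  rcases Nat.lt_or_ge (n % 48) 47 with h | h
  · have hq : (n + 1) / 48 = n / 48 := by omega
    have hr : (n + 1) % 48 = n % 48 + 1 := by omega
    rw [hq, hr]
    have := dRL_mono (n % 48) h
    omega
  · have h47 : n % 48 = 47 := by omega
    have hq : (n + 1) / 48 = n / 48 + 1 := by omega
    have hr : (n + 1) % 48 = 0 := by omega
    rw [hq, hr, h47]
    have h1 : RL.getD 47 0 = 209 := by decide
    have h2 : RL.getD 0 0 = 1 := by decide
    rw [h1, h2]; omega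

theorem gN_mono {m n : Nat} (h : m ≤ n) : gN m ≤ gN n := by
  induction n, h using Nat.le_induction with
  | base => exact le_refl _
  | succ n hmn ih => exact le_trans ih (le_of_lt (gN_strict n))

theorem gN_between (n x : Nat) (h1 : gN n < x) (h2 : x < gN (n + 1)) : cN x = false := by
  unfold gN at h1 h2
  rcases Nat.lt_or_ge (n % 48) 47 with h | h
  · have hq : (n + 1) / 48 = n / 48 := by omega
    have hr : (n + 1) % 48 = n % 48 + 1 := by omega
    rw [hq, hr] at h2
    have hb : RL.getD (n % 48 + 1) 0 < 210 := dRL_lt _ (by omega)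
    have hx : x = 210 * (n / 48) + (x - 210 * (n / 48)) := by omega
    rw [hx, cN_period]
    exact dRL_gap (n % 48) h _ (by omega) (by omega) (by omega)
  · have h47 : n % 48 = 47 := by omega
    have hq : (n + 1) / 48 = n / 48 + 1 := by omega
    have hr : (n + 1) % 48 = 0 := by omega
    rw [hq, hr] at h2
    rw [h47] at h1
    have h1' : RL.getD 47 0 = 209 := by decide
    have h2' : RL.getD 0 0 = 1 := by decide
    rw [h1'] at h1; rw [h2'] at h2
    have hx : x = 210 * (n / 48 + 1) + 0 := by omega
    rw [hx, cN_period]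
    decide

theorem gN_bound (n : Nat) : gN n ≤ 5 * n + 209 := by
  unfold gN
  have := dRL_lt (n % 48) (Nat.mod_lt _ (by norm_num))
  omega

theorem loopA_eq (i : Int) (fuel : Nat) :
    ∀ (num count simple : Int), 5 ≤ count → count ≤ i → 8 ≤ num →
    num ≤ (gN (count - 4).toNat : Int) →
    (∀ x : Int, num ≤ x → x < (gN (count - 4).toNat : Int) → pvC x = false) →
    ((gN (i - 4).toNat : Int) < num + fuel) →
    pvLoopA i fuel num count simple = (gN (i - 4).toNat : Int) := by
  induction fuel with
  | zero =>
    intro num count simple h5 hci h8 hle hemp hfuel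
    exfalso
    have hmono : gN (count - 4).toNat ≤ gN (i - 4).toNat := gN_mono (by omega)
    omega
  | succ fuel ih =>
    intro num count simple h5 hci h8 hle hemp hfuel
    by_cases hc : pvC num = true
    · have hnum : num = (gN (count - 4).toNat : Int) := by
        rcases lt_or_eq_of_le hle with hlt | heq
        · exact absurd (hemp num (le_refl _) hlt) (by simp [hc])
        · exact heq
      simp only [pvLoopA, hc, if_true]
      by_cases hi : count = i
      · rw [if_pos (by omega)]
        rw [hnum, hi]
      · rw [if_neg (by omega)]
        have hsucc : (count + 1 - 4).toNat = (count - 4).toNat + 1 := by omega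
        have hstep := gN_strict (count - 4).toNat
        apply ih (num + 1) (count + 1) num (by omega) (by omega) (by omega)
        · rw [hsucc]; omega
        · intro x hx1 hx2
          rw [hsucc] at hx2
          rw [pvC_eq x (by omega)]
          exact gN_between (count - 4).toNat x.toNat (by omega) (by omega)
        · omega
    · have hc' : pvC num = false := by simpa using hc
      have hlt : num < (gN (count - 4).toNat : Int) := by
        rcases lt_or_eq_of_le hle with hlt | heq
        · exact hlt
        · exfalso
          have hg : pvC ((gN (count - 4).toNat : Nat) : Int) = true := by
            rw [pvC_eq _ (by positivity), Int.toNat_natCast]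
            exact gN_coprime _
          rw [← heq, hc'] at hg
          exact Bool.false_ne_true hg
      simp only [pvLoopA, hc', Bool.false_eq_true, if_false]
      rw [if_neg (by omega)]
      apply ih (num + 1) count simple h5 hci (by omega) (by omega)
      · intro x hx1 hx2
        exact hemp x (by omega) hx2
      · omega

-- the A port for i ≥ 5
theorem a_eval (i : Int) (h : 5 ≤ i) : simple_2 i = (gN (i - 4).toNat : Int) := by
  unfold simple_2
  rw [if_neg (by omega), if_neg (by omega), if_neg (by omega), if_neg (by omega)]
  have hg1 : ((5:Int) - 4).toNat = 1 := by omega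
  have hgN1 : gN 1 = 11 := by decide
  have hgN0 : gN 0 = 1 := by decide
  apply loopA_eq i _ 8 5 0 (by omega) h (by omega)
  · rw [hg1, hgN1]; omega
  · intro x hx1 hx2
    rw [hg1, hgN1] at hx2
    rw [pvC_eq x (by omega)]
    apply gN_between 0 x.toNat
    · rw [hgN0]; omega
    · rw [hgN1]; omega
  · have hb := gN_bound (i - 4).toNat
    omega

theorem wheel_eq : ∀ k : Nat, k < 48 →
    PySem.List.pyGet? pvWheel ((k : Nat) : Int) = some ((RL.getD k 0 : Nat) : Int) := by decide

-- the B port for i ≥ 5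
theorem alt_eval (i : Int) (h : 5 ≤ i) : simple_2_alt i = (gN (i - 4).toNat : Int) := by
  unfold simple_2_alt
  rw [if_neg (by omega)]
  have hn : i - 4 = (((i - 4).toNat : Nat) : Int) := by omega
  set n := (i - 4).toNat with hdef
  have hq : PySem.Int.floordiv (i - 4) 48 = ((n / 48 : Nat) : Int) := by
    rw [hn]; exact_mod_cast PySem.Int.floordiv_natCast n 48
  have hr : PySem.Int.mod (i - 4) 48 = ((n % 48 : Nat) : Int) := by
    rw [hn]; exact_mod_cast PySem.Int.mod_natCast n 48
  have hlt : n % 48 < 48 := Nat.mod_lt _ (by norm_num)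
  have hget : (PySem.List.pyGet? pvWheel ((n % 48 : Nat) : Int)).getD 0
      = ((RL.getD (n % 48) 0 : Nat) : Int) := by
    rw [wheel_eq _ hlt]; rfl
  simp only [hq, hr, hget]
  unfold gN
  push_cast
  ring

-- ===== VERDICT (by name: the statement is the Claim_ definition above) =====
theorem simple_2_spec : Claim_equal_simple_2 := by
  intro i _ hpre
  unfold Spec_simple_2
  by_cases h5 : 5 ≤ i
  · rw [a_eval i h5, alt_eval i h5]
  · have h1 : (1:Int) ≤ i := hpre
    interval_cases i <;> decide
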